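-- pv_equiv track=rewrite | github.com/jayanarayanmenonnettath2024aids/tancam | processing/deduplicator.py | merge_partial_records
-- ===== SOURCE A (Python) =====
-- def merge_partial_records(records, unique_key="invoice_no"):
--     """
--     Merges records sharing the same key by overwriting None values with known values.
--     """
--     merged_map = {}
--     for r in records:
--         key = r.get(unique_key)
--         if not key:
--             continue
--
--         if key not in merged_map:
--             merged_map[key] = r.copy()
--         else:
--             # Update missing values
--             for k, v in r.items():
--                 if merged_map[key].get(k) is None and v is not None:
--                     merged_map[key][k] = v
--
--     return list(merged_map.values())
-- ===== SOURCE B (Python) =====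
-- def merge_partial_records(records, unique_key="invoice_no"):
--     """
--     Two-phase: group records by key (first-appearance order), then for each
--     group compute the merged record directly: each field of the first record
--     filled with the first non-None value seen for that field anywhere in the
--     group, followed by the extra fields (first non-None occurrence order).
--     """
--     groups = {}
--     for r in records:
--         key = r.get(unique_key)
--         if not key:
--             continue
--         groups.setdefault(key, []).append(r)
--
--     result = []
--     for group in groups.values():
--         best = {}  # first non-None value per field across the whole group
--         for r in group:
--             for k, v in r.items():
--                 if v is not None and k not in best:
--                     best[k] = v
--         merged = {k: best.get(k) for k in group[0]}
--         for k, v in best.items():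
--             if k not in merged:
--                 merged[k] = v
--         result.append(merged)
--     return result
-- ===== Notes on version B (the rewrite author's own statement) =====
-- stated objective: alternative
-- what changed: Replaces A's single interleaved pass (a dict of merged records updated while scanning, filling None fields record by record) with a two-phase computation: first group the records by key, then build each merged record directly from its group - the first record's fields valued by the group-wide first non-None value per field, followed by the remaining fields in first-non-None-occurrence order; Pre_ excludes records whose association lists repeat a field name, which cannot arise from Python dicts (a dict has unique keys).
import Mathlib
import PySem

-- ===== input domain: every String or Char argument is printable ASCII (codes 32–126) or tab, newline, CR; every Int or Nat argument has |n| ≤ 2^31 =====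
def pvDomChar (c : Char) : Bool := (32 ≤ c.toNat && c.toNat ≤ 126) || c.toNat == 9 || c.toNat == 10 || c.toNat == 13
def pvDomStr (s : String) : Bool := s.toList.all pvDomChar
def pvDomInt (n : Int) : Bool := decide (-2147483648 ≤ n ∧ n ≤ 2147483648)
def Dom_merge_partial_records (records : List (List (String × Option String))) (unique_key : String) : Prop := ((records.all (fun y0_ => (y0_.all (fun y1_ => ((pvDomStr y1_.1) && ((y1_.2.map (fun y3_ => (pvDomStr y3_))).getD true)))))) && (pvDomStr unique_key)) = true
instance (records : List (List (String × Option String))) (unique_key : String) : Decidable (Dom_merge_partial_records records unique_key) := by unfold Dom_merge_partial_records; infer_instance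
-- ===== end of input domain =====

-- B replaces A's single interleaved pass (a dict of merged records updated while scanning) by a
-- two-phase computation: group the records by key, then build each merged record directly from its
-- group (each field's first non-None value).  Objective: alternative decomposition, same cost.

-- ===== PORT A =====

-- r.get(unique_key) followed by `if not key`: the truthy key, or none (missing / None / "")
def pvKeyOf (r : List (String × Option String)) (unique_key : String) : Option String :=
  match (PySem.Dict.mk r).get? unique_key with
  | some (some s) => if s = "" then none else some s
  | _ => none

-- the inner `for k, v in r.items(): if merged_map[key].get(k) is None and v is not None: merged_map[key][k] = v`
def pvFillA (cur : PySem.Dict String (Option String)) (r : List (String × Option String)) :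
    PySem.Dict String (Option String) :=
  r.foldl (fun c kv =>
    if (c.get? kv.1).getD none = none ∧ kv.2 ≠ none then c.insert kv.1 kv.2 else c) cur

def pvStepA (unique_key : String) (mm : PySem.Dict String (PySem.Dict String (Option String)))
    (r : List (String × Option String)) : PySem.Dict String (PySem.Dict String (Option String)) :=
  match pvKeyOf r unique_key with
  | none => mm
  | some key =>
    match mm.get? key with
    | none => mm.insert key (PySem.Dict.mk r)        -- merged_map[key] = r.copy()
    | some cur => mm.insert key (pvFillA cur r)      -- in-place update of merged_map[key]

def merge_partial_records (records : List (List (String × Option String))) (unique_key : String) :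
    List (List (String × Option String)) :=
  (records.foldl (pvStepA unique_key) PySem.Dict.empty).values.map PySem.Dict.items

-- ===== PORT B =====

-- first non-None value per field across the records seen so far (Source B's `best` loop)
def pvBestStep (b : PySem.Dict String (Option String)) (kv : String × Option String) :
    PySem.Dict String (Option String) :=
  if kv.2 ≠ none ∧ b.contains kv.1 = false then b.insert kv.1 kv.2 else b

def pvBestOf (group : List (List (String × Option String))) : PySem.Dict String (Option String) :=
  group.foldl (fun b r => r.foldl pvBestStep b) PySem.Dict.empty

-- Source B's merge of ONE group: best, then {k: best.get(k) for k in group[0]}, then append the rest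
def pvMergeGroup (group : List (List (String × Option String))) : List (String × Option String) :=
  let best := pvBestOf group
  let merged := (group.headD []).foldl
    (fun m kv => m.insert kv.1 (best.getD kv.1 none)) (PySem.Dict.empty (κ := String))
  (best.items.foldl (fun m kv => if m.contains kv.1 then m else m.insert kv.1 kv.2) merged).items

def pvStepGroup (unique_key : String) (gs : PySem.Dict String (List (List (String × Option String))))
    (r : List (String × Option String)) : PySem.Dict String (List (List (String × Option String))) :=
  match pvKeyOf r unique_key with
  | none => gs
  | some key => gs.insert key (gs.getD key [] ++ [r])   -- groups.setdefault(key, []).append(r)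

def merge_partial_records_alt (records : List (List (String × Option String))) (unique_key : String) :
    List (List (String × Option String)) :=
  (records.foldl (pvStepGroup unique_key) PySem.Dict.empty).values.map pvMergeGroup

-- ===== PRECONDITION & SPEC =====
-- Pre_ excludes records whose association lists repeat a field name: such inputs cannot arise from
-- Python dicts (a dict has unique keys), and on them the assoc-list behaviour of either port is
-- accidental.
def Pre_merge_partial_records (records : List (List (String × Option String))) (unique_key : String) : Prop :=
  ∀ r ∈ records, (r.map Prod.fst).Nodup
instance (records : List (List (String × Option String))) (unique_key : String) : Decidable (Pre_merge_partial_records records unique_key) := by unfold Pre_merge_partial_records; infer_instance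

def pvWitness_merge_partial_records : (List (List (String × Option String))) × String :=
  ([[("invoice_no", some "1"), ("amt", none)], [("invoice_no", some "1"), ("amt", some "7")]], "invoice_no")

def Spec_merge_partial_records (records : List (List (String × Option String))) (unique_key : String) (out : List (List (String × Option String))) : Prop := out = merge_partial_records_alt records unique_key
instance (records : List (List (String × Option String))) (unique_key : String) (out : List (List (String × Option String))) : Decidable (Spec_merge_partial_records records unique_key out) := by unfold Spec_merge_partial_records; infer_instance

-- ===== CLAIM (what is proved, stated in full; the proofs are below) =====
def Claim_equal_merge_partial_records : Prop := ∀ (records : List (List (String × Option String))) (unique_key : String), Dom_merge_partial_records records unique_key → Pre_merge_partial_records records unique_key → Spec_merge_partial_records records unique_key (merge_partial_records records unique_key)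

-- ===== LEMMAS AND PROOFS =====

-- canonical merged record of a group with first record `f`: f's fields valued by `b`
-- (the first-non-None table), then b's remaining entries
def pvBuild (f : List (String × Option String)) (b : PySem.Dict String (Option String)) :
    PySem.Dict String (Option String) :=
  PySem.Dict.mk (f.map (fun kv => (kv.1, b.getD kv.1 none)) ++
    b.items.filter (fun kv => decide (kv.1 ∉ f.map Prod.fst)))

-- invariant of the first-non-None table
def pvInv (b : PySem.Dict String (Option String)) : Prop :=
  b.keys.Nodup ∧ ∀ kv ∈ b.items, kv.2 ≠ none

-- A-side group merge: first record as dict, then fill with the rest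
def pvMergeA (g : List (List (String × Option String))) : PySem.Dict String (Option String) :=
  match g with
  | [] => PySem.Dict.empty
  | r :: t => t.foldl pvFillA (PySem.Dict.mk r)

theorem pvGet?_mk_append_left {ν : Type} (l1 l2 : List (String × ν)) (k : String)
    (h : k ∈ l1.map Prod.fst) :
    (PySem.Dict.mk (l1 ++ l2)).get? k = (PySem.Dict.mk l1).get? k := by
  induction l1 with
  | nil => simp at h
  | cons kv l1 ih =>
    obtain ⟨a, w⟩ := kv
    rw [List.cons_append, PySem.Dict.get?_mk_cons, PySem.Dict.get?_mk_cons]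
    by_cases hk : a = k
    · simp [hk]
    · simp only [List.map_cons, List.mem_cons] at h
      simp [hk, ih (h.resolve_left (fun hh => hk hh.symm))]

theorem pvGet?_mk_append_right {ν : Type} (l1 l2 : List (String × ν)) (k : String)
    (h : k ∉ l1.map Prod.fst) :
    (PySem.Dict.mk (l1 ++ l2)).get? k = (PySem.Dict.mk l2).get? k := by
  induction l1 with
  | nil => rfl
  | cons kv l1 ih =>
    obtain ⟨a, w⟩ := kv
    simp only [List.map_cons, List.mem_cons, not_or] at h
    have hne : ¬ a = k := fun hh => h.1 hh.symm
    rw [List.cons_append, PySem.Dict.get?_mk_cons]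
    simp [hne, ih h.2]

theorem pvGet?_mk_not_mem {ν : Type} (l : List (String × ν)) (k : String)
    (h : k ∉ l.map Prod.fst) : (PySem.Dict.mk l).get? k = none := by
  induction l with
  | nil => rfl
  | cons kv l ih =>
    obtain ⟨a, w⟩ := kv
    simp only [List.map_cons, List.mem_cons, not_or] at h
    have hne : ¬ a = k := fun hh => h.1 hh.symm
    rw [PySem.Dict.get?_mk_cons]
    simp [hne, ih h.2]

theorem pvGet?_mk_mapVal {ν ν' : Type} (l : List (String × ν)) (φ : ν → ν') (k : String) :
    (PySem.Dict.mk (l.map (fun p => (p.1, φ p.2)))).get? k = ((PySem.Dict.mk l).get? k).map φ := by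
  induction l with
  | nil => rfl
  | cons kv l ih =>
    obtain ⟨a, w⟩ := kv
    rw [List.map_cons, PySem.Dict.get?_mk_cons, PySem.Dict.get?_mk_cons]
    by_cases hk : a = k <;> simp [hk, ih]

theorem pvGet?_mk_mapGetD (f : List (String × Option String))
    (b : PySem.Dict String (Option String)) (k : String) :
    (PySem.Dict.mk (f.map (fun kv => (kv.1, b.getD kv.1 none)))).get? k =
      if k ∈ f.map Prod.fst then some (b.getD k none) else none := by
  induction f with
  | nil => rfl
  | cons kv f ih =>
    obtain ⟨a, w⟩ := kv
    rw [List.map_cons, PySem.Dict.get?_mk_cons]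
    by_cases hk : a = k
    · simp [hk]
    · simp only [List.map_cons, List.mem_cons]
      rw [if_neg (by simp [hk]), ih]
      by_cases hm : k ∈ f.map Prod.fst
      · rw [if_pos hm, if_pos (Or.inr hm)]
      · rw [if_neg hm, if_neg (by rintro (h1 | h2); exact hk h1.symm; exact hm h2)]

theorem pvGet?_mk_filter {ν : Type} (l : List (String × ν)) (p : String × ν → Bool) (k : String)
    (h : ∀ kv ∈ l, kv.1 = k → p kv = true) :
    (PySem.Dict.mk (l.filter p)).get? k = (PySem.Dict.mk l).get? k := by
  induction l with
  | nil => rfl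
  | cons kv l ih =>
    obtain ⟨a, w⟩ := kv
    have ih' := ih (fun kv h1 h2 => h kv (List.mem_cons_of_mem _ h1) h2)
    rw [List.filter_cons]
    by_cases hk : a = k
    · rw [if_pos (h (a, w) List.mem_cons_self hk)]
      rw [PySem.Dict.get?_mk_cons, PySem.Dict.get?_mk_cons]
      by_cases hak : (a == k) = true
      · simp [hak]
      · simp [hak, ih']
    · by_cases hp : p (a, w) = true
      · rw [if_pos hp, PySem.Dict.get?_mk_cons, PySem.Dict.get?_mk_cons,
          if_neg (by simp [hk]), if_neg (by simp [hk]), ih']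
      · rw [if_neg hp, PySem.Dict.get?_mk_cons, if_neg (by simp [hk]), ih']

theorem pvGet?_build (f : List (String × Option String)) (b : PySem.Dict String (Option String))
    (k : String) :
    (pvBuild f b).get? k = if k ∈ f.map Prod.fst then some (b.getD k none) else b.get? k := by
  by_cases hk : k ∈ f.map Prod.fst
  · rw [pvBuild, pvGet?_mk_append_left _ _ _ (by simpa using hk), pvGet?_mk_mapGetD, if_pos hk,
      if_pos hk]
  · rw [pvBuild, pvGet?_mk_append_right _ _ _ (by simpa using hk),
      pvGet?_mk_filter _ _ _ (fun kv _ h2 => by simp [h2, hk]), if_neg hk]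

theorem pvContains_eq_any {ν : Type} (d : PySem.Dict String ν) (k : String) :
    d.contains k = d.items.any (fun p => p.1 == k) := by
  rw [← PySem.Dict.contains_mk d.items k]

theorem pvInv_empty : pvInv PySem.Dict.empty := by
  refine ⟨?_, ?_⟩ <;> simp [PySem.Dict.empty, PySem.Dict.keys]

theorem pvInv_bestStep (b : PySem.Dict String (Option String)) (kv : String × Option String)
    (h : pvInv b) : pvInv (pvBestStep b kv) := by
  obtain ⟨hnd, hv⟩ := h
  unfold pvBestStep
  split_ifs with hc
  · refine ⟨PySem.Dict.nodup_keys_insert _ _ _ hnd, ?_⟩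
    intro p hp
    rw [PySem.Dict.mem_items_insert] at hp
    rcases hp with h1 | h2
    · rw [h1]; exact hc.1
    · exact hv p h2.1
  · exact ⟨hnd, hv⟩

theorem pvInv_foldl_bestStep (r : List (String × Option String))
    (b : PySem.Dict String (Option String)) (h : pvInv b) : pvInv (r.foldl pvBestStep b) := by
  induction r generalizing b with
  | nil => exact h
  | cons kv r ih => exact ih _ (pvInv_bestStep b kv h)

theorem pvInv_foldl_bestRec (g : List (List (String × Option String)))
    (b : PySem.Dict String (Option String)) (h : pvInv b) :
    pvInv (g.foldl (fun b r => r.foldl pvBestStep b) b) := by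
  induction g generalizing b with
  | nil => exact h
  | cons r g ih => exact ih _ (pvInv_foldl_bestStep r b h)

theorem pvInv_bestOf (g : List (List (String × Option String))) : pvInv (pvBestOf g) :=
  pvInv_foldl_bestRec g _ pvInv_empty

theorem pvFill_step (f : List (String × Option String)) (b : PySem.Dict String (Option String))
    (kv : String × Option String) (h : pvInv b) :
    (if ((pvBuild f b).get? kv.1).getD none = none ∧ kv.2 ≠ none
      then (pvBuild f b).insert kv.1 kv.2 else pvBuild f b) = pvBuild f (pvBestStep b kv) := by
  obtain ⟨k, v⟩ := kv
  by_cases hv : v = none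
  · subst hv; simp [pvBestStep]
  · by_cases hc : b.contains k = true
    · obtain ⟨w, hw⟩ : ∃ w, b.get? k = some w := by
        rw [PySem.Dict.contains_eq_isSome_get?] at hc
        exact Option.isSome_iff_exists.1 hc
      have hwne : w ≠ none := h.2 (k, w) (PySem.Dict.mem_items_of_get?_eq_some b hw)
      have hget : ((pvBuild f b).get? k).getD none = w := by
        rw [pvGet?_build]
        split_ifs with hf
        · rw [PySem.Dict.getD_of_get?_eq_some b none hw]; rfl
        · rw [hw]; rfl
      rw [if_neg (by rw [hget]; exact fun hh => hwne hh.1), pvBestStep,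
        if_neg (by rintro ⟨-, h2⟩; rw [hc] at h2; cases h2)]
    · have hcf : b.contains k = false := by simpa using hc
      have hget : b.get? k = none := by
        rw [PySem.Dict.contains_eq_isSome_get?] at hcf
        cases hb : b.get? k with
        | none => rfl
        | some w => rw [hb] at hcf; cases hcf
      have hkeysb : ∀ p ∈ b.items, p.1 ≠ k := by
        intro p hp hpk
        have hk : k ∉ b.keys := (PySem.Dict.get?_eq_none_iff_not_mem_keys b k).1 hget
        exact hk (by simp only [PySem.Dict.keys]; exact List.mem_map.2 ⟨p, hp, hpk⟩)
      have hcond : ((pvBuild f b).get? k).getD none = none := by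
        rw [pvGet?_build]
        split_ifs with hf
        · rw [PySem.Dict.getD_of_get?_eq_none b none hget]; rfl
        · rw [hget]; rfl
      rw [if_pos ⟨hcond, hv⟩, pvBestStep, if_pos ⟨hv, hcf⟩]
      have hbitems : (b.insert k v).items = b.items ++ [(k, v)] :=
        PySem.Dict.items_insert_of_not_contains b v hcf
      apply PySem.Dict.ext
      by_cases hf : k ∈ f.map Prod.fst
      · have hcontains : (pvBuild f b).contains k = true := by
          rw [PySem.Dict.contains_eq_isSome_get?, pvGet?_build, if_pos hf]; rfl
        rw [PySem.Dict.items_insert_of_contains _ _ hcontains]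
        show ((f.map (fun kv => (kv.1, b.getD kv.1 none)) ++
            b.items.filter (fun kv => decide (kv.1 ∉ f.map Prod.fst))).map
              (fun p => if (p.1 == k) = true then (k, v) else p)) =
          f.map (fun kv => (kv.1, (b.insert k v).getD kv.1 none)) ++
            (b.insert k v).items.filter (fun kv => decide (kv.1 ∉ f.map Prod.fst))
        rw [List.map_append]
        congr 1
        · rw [List.map_map]
          apply List.map_congr_left
          intro p hp
          by_cases hpk : p.1 = k
          · simp [Function.comp, hpk]
          · simp [Function.comp, hpk, PySem.Dict.getD_insert]
        · rw [hbitems, List.filter_append]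
          have hnil : ([(k, v)].filter (fun kv => decide (kv.1 ∉ f.map Prod.fst))) = [] := by
            simp [hf]
          rw [hnil, List.append_nil]
          conv_rhs => rw [← List.map_id (List.filter (fun kv => decide (kv.1 ∉ List.map Prod.fst f)) b.items)]
          apply List.map_congr_left
          intro p hp
          have hpk : p.1 ≠ k := hkeysb p (List.mem_of_mem_filter hp)
          simp [hpk]
      · have hcontains : (pvBuild f b).contains k = false := by
          rw [PySem.Dict.contains_eq_isSome_get?, pvGet?_build, if_neg hf, hget]; rfl
        rw [PySem.Dict.items_insert_of_not_contains _ _ hcontains]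
        show (f.map (fun kv => (kv.1, b.getD kv.1 none)) ++
            b.items.filter (fun kv => decide (kv.1 ∉ f.map Prod.fst))) ++ [(k, v)] =
          f.map (fun kv => (kv.1, (b.insert k v).getD kv.1 none)) ++
            (b.insert k v).items.filter (fun kv => decide (kv.1 ∉ f.map Prod.fst))
        have h1 : f.map (fun kv => (kv.1, (b.insert k v).getD kv.1 none)) =
            f.map (fun kv => (kv.1, b.getD kv.1 none)) := by
          apply List.map_congr_left
          intro p hp
          have hpk : p.1 ≠ k := fun hh => hf (hh ▸ List.mem_map.2 ⟨p, hp, rfl⟩)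
          rw [PySem.Dict.getD_insert, if_neg hpk]
        have h2 : (b.insert k v).items.filter (fun kv => decide (kv.1 ∉ f.map Prod.fst)) =
            b.items.filter (fun kv => decide (kv.1 ∉ f.map Prod.fst)) ++ [(k, v)] := by
          rw [hbitems, List.filter_append]; simp [hf]
        rw [h1, h2, List.append_assoc]

theorem pvFillA_build (f : List (String × Option String)) (r : List (String × Option String))
    (b : PySem.Dict String (Option String)) (h : pvInv b) :
    pvFillA (pvBuild f b) r = pvBuild f (r.foldl pvBestStep b) := by
  induction r generalizing b with
  | nil => rfl
  | cons kv r ih =>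
    show List.foldl _ _ (kv :: r) = _
    rw [List.foldl_cons, List.foldl_cons]
    have hstep := pvFill_step f b kv h
    simp only at hstep ⊢
    rw [hstep]
    exact ih (pvBestStep b kv) (pvInv_bestStep b kv h)

theorem pvFoldl_fillA_build (t : List (List (String × Option String)))
    (f : List (String × Option String)) (b : PySem.Dict String (Option String)) (h : pvInv b) :
    t.foldl pvFillA (pvBuild f b) =
      pvBuild f (t.foldl (fun b r => r.foldl pvBestStep b) b) := by
  induction t generalizing b with
  | nil => rfl
  | cons r t ih =>
    rw [List.foldl_cons, List.foldl_cons, pvFillA_build f r b h]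
    exact ih _ (pvInv_foldl_bestStep r b h)

theorem pvBest_fresh (f : List (String × Option String)) (b : PySem.Dict String (Option String))
    (hnd : (f.map Prod.fst).Nodup) (hfresh : ∀ kv ∈ f, b.contains kv.1 = false) :
    f.foldl pvBestStep b = PySem.Dict.mk (b.items ++ f.filter (fun kv => kv.2.isSome)) := by
  induction f generalizing b with
  | nil => apply PySem.Dict.ext; simp
  | cons kv f ih =>
    obtain ⟨k, v⟩ := kv
    have hndc := List.nodup_cons.1 (show (k :: f.map Prod.fst).Nodup from by
      simpa only [List.map_cons] using hnd)
    rw [List.foldl_cons, List.filter_cons]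
    cases v with
    | none =>
      have hb : pvBestStep b (k, none) = b := by simp [pvBestStep]
      rw [hb]
      simp only [Option.isSome_none, Bool.false_eq_true, if_false]
      exact ih b hndc.2 (fun p hp => hfresh p (List.mem_cons_of_mem _ hp))
    | some s =>
      have hc : b.contains k = false := hfresh (k, some s) List.mem_cons_self
      have hstep : pvBestStep b (k, some s) = PySem.Dict.mk (b.items ++ [(k, some s)]) := by
        rw [pvBestStep, if_pos ⟨by simp, hc⟩]
        apply PySem.Dict.ext
        exact PySem.Dict.items_insert_of_not_contains b (some s) hc
      rw [hstep]
      have hfresh' : ∀ p ∈ f, (PySem.Dict.mk (b.items ++ [(k, some s)])).contains p.1 = false := by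
        intro p hp
        have h1 := hfresh p (List.mem_cons_of_mem _ hp)
        rw [pvContains_eq_any] at h1 ⊢
        have hkp : ¬ (k = p.1) := fun hh => hndc.1 (hh ▸ List.mem_map.2 ⟨p, hp, rfl⟩)
        simp only [List.any_append] at *
        simp [h1, hkp]
      rw [ih _ hndc.2 hfresh']
      apply PySem.Dict.ext
      show (b.items ++ [(k, some s)]) ++ _ = b.items ++ (k, some s) :: _
      rw [List.append_assoc]; rfl

theorem pvGetD_mk_filter_isSome (f : List (String × Option String))
    (hnd : (f.map Prod.fst).Nodup) (kv : String × Option String) (hm : kv ∈ f) :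
    (PySem.Dict.mk (f.filter (fun p => p.2.isSome))).getD kv.1 none = kv.2 := by
  induction f with
  | nil => cases hm
  | cons p f ih =>
    obtain ⟨a, w⟩ := p
    have hndc := List.nodup_cons.1 (show (a :: f.map Prod.fst).Nodup from by
      simpa only [List.map_cons] using hnd)
    rw [List.filter_cons]
    rcases List.mem_cons.1 hm with rfl | hm'
    · cases w with
      | some s =>
        simp only [Option.isSome_some, if_true]
        rw [PySem.Dict.getD_eq_get?_getD, PySem.Dict.get?_mk_cons]
        simp
      | none =>
        simp only [Option.isSome_none, Bool.false_eq_true, if_false]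
        have hnm : (a, (none : Option String)).1 ∉ (f.filter (fun p => p.2.isSome)).map Prod.fst := by
          intro hh
          rcases List.mem_map.1 hh with ⟨q, hq, hq1⟩
          have hmem : q.1 ∈ f.map Prod.fst := List.mem_map.2 ⟨q, List.mem_of_mem_filter hq, rfl⟩
          have hq1' : q.1 = a := hq1
          exact hndc.1 (hq1' ▸ hmem)
        rw [PySem.Dict.getD_eq_get?_getD, pvGet?_mk_not_mem _ _ hnm]; rfl
    · have hne : ¬ (a = kv.1) := fun hh => hndc.1 (hh ▸ List.mem_map.2 ⟨kv, hm', rfl⟩)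
      have ihr := ih hndc.2 hm'
      by_cases hw : w.isSome
      · rw [if_pos hw, PySem.Dict.getD_eq_get?_getD, PySem.Dict.get?_mk_cons, if_neg (by simp [hne])]
        rw [PySem.Dict.getD_eq_get?_getD] at ihr
        exact ihr
      · rw [if_neg hw]; exact ihr

theorem pvMk_eq_build (f : List (String × Option String)) (hnd : (f.map Prod.fst).Nodup) :
    PySem.Dict.mk f = pvBuild f (f.foldl pvBestStep PySem.Dict.empty) := by
  rw [pvBest_fresh f PySem.Dict.empty hnd (fun kv _ => by rw [pvContains_eq_any]; rfl)]
  have hnil : PySem.Dict.empty.items = ([] : List (String × Option String)) := rfl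
  rw [hnil, List.nil_append]
  apply PySem.Dict.ext
  show f = f.map (fun kv => (kv.1, (PySem.Dict.mk (f.filter (fun p => p.2.isSome))).getD kv.1 none))
      ++ (f.filter (fun p => p.2.isSome)).filter (fun kv => decide (kv.1 ∉ f.map Prod.fst))
  have h2 : (f.filter (fun p => p.2.isSome)).filter (fun kv => decide (kv.1 ∉ f.map Prod.fst)) = [] := by
    rw [List.filter_eq_nil_iff]
    intro p hp
    have hpf : p ∈ f := List.mem_of_mem_filter hp
    simp only [decide_eq_true_eq, not_not]
    exact List.mem_map.2 ⟨p, hpf, rfl⟩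
  have h1 : f.map (fun kv => (kv.1, (PySem.Dict.mk (f.filter (fun p => p.2.isSome))).getD kv.1 none)) = f := by
    conv_rhs => rw [← List.map_id f]
    apply List.map_congr_left
    intro p hp
    rw [pvGetD_mk_filter_isSome f hnd p hp, id_eq]
  rw [h1, h2, List.append_nil]

theorem pvMergeA_build (r : List (String × Option String))
    (t : List (List (String × Option String))) (hnd : (r.map Prod.fst).Nodup) :
    pvMergeA (r :: t) = pvBuild r (pvBestOf (r :: t)) := by
  show t.foldl pvFillA (PySem.Dict.mk r) = _
  rw [pvMk_eq_build r hnd,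
    pvFoldl_fillA_build t r _ (pvInv_foldl_bestStep r _ pvInv_empty)]
  rfl

theorem pvAny_fst_eq_mem {ν : Type} (l : List (String × ν)) (x : String) :
    (l.any (fun p => p.1 == x)) = decide (x ∈ l.map Prod.fst) := by
  induction l with
  | nil => rfl
  | cons p l ih =>
    simp only [List.any_cons, List.map_cons, List.mem_cons, ih]
    by_cases h : x = p.1
    · simp [h]
    · have hb : (p.1 == x) = false := beq_eq_false_iff_ne.2 (fun hh => h hh.symm)
      rw [hb, Bool.false_or]
      simp [h]

theorem pvMergedComp_items (f : List (String × Option String))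
    (best : PySem.Dict String (Option String)) (hnd : (f.map Prod.fst).Nodup) :
    (f.foldl (fun m kv => m.insert kv.1 (best.getD kv.1 none))
        (PySem.Dict.empty : PySem.Dict String (Option String))).items
      = f.map (fun kv => (kv.1, best.getD kv.1 none)) := by
  refine (PySem.Dict.items_foldl_insert_fresh f (fun kv => kv.1)
    (fun kv => best.getD kv.1 none) PySem.Dict.empty
    (fun a _ => by rw [pvContains_eq_any]; rfl) hnd).trans ?_
  rfl

theorem pvAppendLoop (l : List (String × Option String)) (F : List String)
    (m : PySem.Dict String (Option String)) (hnd : (l.map Prod.fst).Nodup)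
    (hc : ∀ kv ∈ l, m.contains kv.1 = decide (kv.1 ∈ F)) :
    (l.foldl (fun m kv => if m.contains kv.1 then m else m.insert kv.1 kv.2) m).items
      = m.items ++ l.filter (fun kv => decide (kv.1 ∉ F)) := by
  induction l generalizing m with
  | nil => simp
  | cons kv l ih =>
    obtain ⟨k, v⟩ := kv
    have hndc := List.nodup_cons.1 (show (k :: l.map Prod.fst).Nodup from by
      simpa only [List.map_cons] using hnd)
    rw [List.foldl_cons, List.filter_cons]
    by_cases hF : k ∈ F
    · have hck : m.contains k = true := by
        rw [hc (k, v) List.mem_cons_self]; simpa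
      rw [if_pos hck, if_neg (by simp [hF])]
      exact ih m hndc.2 (fun p hp => hc p (List.mem_cons_of_mem _ hp))
    · have hck : m.contains k = false := by
        rw [hc (k, v) List.mem_cons_self]; simp [hF]
      rw [if_neg (by rw [hck]; exact Bool.false_ne_true), if_pos (by simp [hF])]
      have hitems : (m.insert k v).items = m.items ++ [(k, v)] :=
        PySem.Dict.items_insert_of_not_contains m v hck
      have hc' : ∀ p ∈ l, (m.insert k v).contains p.1 = decide (p.1 ∈ F) := by
        intro p hp
        have hkp : ¬ (p.1 = k) := fun hh => hndc.1 (hh ▸ List.mem_map.2 ⟨p, hp, rfl⟩)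
        rw [PySem.Dict.contains_insert, hc p (List.mem_cons_of_mem _ hp)]
        simp [hkp]
      rw [ih _ hndc.2 hc', hitems, List.append_assoc]
      rfl

theorem pvMergeGroup_eq (r : List (String × Option String))
    (t : List (List (String × Option String))) (hnd : (r.map Prod.fst).Nodup) :
    pvMergeGroup (r :: t) = (pvBuild r (pvBestOf (r :: t))).items := by
  have hrw : pvMergeGroup (r :: t) =
      ((pvBestOf (r :: t)).items.foldl
        (fun m kv => if m.contains kv.1 then m else m.insert kv.1 kv.2)
        (r.foldl (fun m kv => m.insert kv.1 ((pvBestOf (r :: t)).getD kv.1 none))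
          PySem.Dict.empty)).items := rfl
  rw [hrw]
  have hmi := pvMergedComp_items r (pvBestOf (r :: t)) hnd
  have hbn : ((pvBestOf (r :: t)).items.map Prod.fst).Nodup := (pvInv_bestOf (r :: t)).1
  have hc : ∀ kv ∈ (pvBestOf (r :: t)).items,
      (r.foldl (fun m kv => m.insert kv.1 ((pvBestOf (r :: t)).getD kv.1 none))
        PySem.Dict.empty).contains kv.1 = decide (kv.1 ∈ r.map Prod.fst) := by
    intro kv _
    rw [pvContains_eq_any]
    have hany : (r.map (fun kv => (kv.1, (pvBestOf (r :: t)).getD kv.1 none))).any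
        (fun p => p.1 == kv.1) = r.any (fun p => p.1 == kv.1) := by
      rw [List.any_map]; rfl
    rw [show ((r.foldl (fun m kv => m.insert kv.1 ((pvBestOf (r :: t)).getD kv.1 none))
        PySem.Dict.empty).items) = r.map (fun kv => (kv.1, (pvBestOf (r :: t)).getD kv.1 none))
        from hmi, hany, pvAny_fst_eq_mem]
  rw [pvAppendLoop _ _ _ hbn hc, hmi]
  rfl

theorem pvGroups_wf (unique_key : String) (records : List (List (String × Option String)))
    (gsI : PySem.Dict String (List (List (String × Option String))))
    (hrec : ∀ r ∈ records, (r.map Prod.fst).Nodup)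
    (hgs : ∀ p ∈ gsI.items, p.2 ≠ [] ∧ ∀ r ∈ p.2, (r.map Prod.fst).Nodup) :
    ∀ p ∈ (records.foldl (pvStepGroup unique_key) gsI).items,
      p.2 ≠ [] ∧ ∀ r ∈ p.2, (r.map Prod.fst).Nodup := by
  induction records generalizing gsI with
  | nil => exact hgs
  | cons r records ih =>
    rw [List.foldl_cons]
    have hrecr := hrec r List.mem_cons_self
    have hrec' := fun q hq => hrec q (List.mem_cons_of_mem _ hq)
    cases hk : pvKeyOf r unique_key with
    | none =>
      rw [show pvStepGroup unique_key gsI r = gsI from by simp only [pvStepGroup, hk]]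
      exact ih _ hrec' hgs
    | some key =>
      rw [show pvStepGroup unique_key gsI r = gsI.insert key (gsI.getD key [] ++ [r]) from by
        simp only [pvStepGroup, hk]]
      apply ih _ hrec'
      intro p hp
      rw [PySem.Dict.mem_items_insert] at hp
      rcases hp with h1 | h2
      · rw [h1]
        refine ⟨by simp, ?_⟩
        intro q hq
        rcases List.mem_append.1 hq with hq1 | hq2
        · cases hg : gsI.get? key with
          | none => rw [PySem.Dict.getD_of_get?_eq_none gsI [] hg] at hq1; cases hq1
          | some g =>
            rw [PySem.Dict.getD_of_get?_eq_some gsI [] hg] at hq1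
            exact (hgs (key, g) (PySem.Dict.mem_items_of_get?_eq_some gsI hg)).2 q hq1
        · rw [List.mem_singleton.1 hq2]; exact hrecr
      · exact hgs p h2.1

theorem pvOuter (unique_key : String) (records : List (List (String × Option String)))
    (gsI : PySem.Dict String (List (List (String × Option String))))
    (hgs : ∀ p ∈ gsI.items, p.2 ≠ []) (hnd : gsI.keys.Nodup) :
    records.foldl (pvStepA unique_key)
        (PySem.Dict.mk (gsI.items.map (fun p => (p.1, pvMergeA p.2))))
      = PySem.Dict.mk
          ((records.foldl (pvStepGroup unique_key) gsI).items.map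
            (fun p => (p.1, pvMergeA p.2))) := by
  induction records generalizing gsI with
  | nil => rfl
  | cons r records ih =>
    rw [List.foldl_cons, List.foldl_cons]
    cases hk : pvKeyOf r unique_key with
    | none =>
      rw [show pvStepA unique_key
          (PySem.Dict.mk (gsI.items.map (fun p => (p.1, pvMergeA p.2)))) r
          = PySem.Dict.mk (gsI.items.map (fun p => (p.1, pvMergeA p.2))) from by
        simp only [pvStepA, hk],
        show pvStepGroup unique_key gsI r = gsI from by simp only [pvStepGroup, hk]]
      exact ih gsI hgs hnd
    | some key =>
      have hmm : (PySem.Dict.mk (gsI.items.map (fun p => (p.1, pvMergeA p.2)))).get? key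
          = (gsI.get? key).map pvMergeA := pvGet?_mk_mapVal gsI.items pvMergeA key
      rw [show pvStepGroup unique_key gsI r = gsI.insert key (gsI.getD key [] ++ [r]) from by
        simp only [pvStepGroup, hk]]
      cases hg : gsI.get? key with
      | none =>
        have hmk : (PySem.Dict.mk (gsI.items.map (fun p => (p.1, pvMergeA p.2)))).get? key
            = none := by rw [hmm, hg]; rfl
        have hgc : gsI.contains key = false := by
          rw [PySem.Dict.contains_eq_isSome_get?, hg]; rfl
        have hmmc : (PySem.Dict.mk (gsI.items.map (fun p => (p.1, pvMergeA p.2)))).contains key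
            = false := by rw [PySem.Dict.contains_eq_isSome_get?, hmk]; rfl
        have hgd : gsI.getD key [] = [] := PySem.Dict.getD_of_get?_eq_none gsI [] hg
        rw [show pvStepA unique_key
            (PySem.Dict.mk (gsI.items.map (fun p => (p.1, pvMergeA p.2)))) r
            = (PySem.Dict.mk (gsI.items.map (fun p => (p.1, pvMergeA p.2)))).insert key
                (PySem.Dict.mk r) from by simp only [pvStepA, hk, hmk]]
        have hins : (PySem.Dict.mk (gsI.items.map (fun p => (p.1, pvMergeA p.2)))).insert key
            (PySem.Dict.mk r)
            = PySem.Dict.mk ((gsI.insert key (gsI.getD key [] ++ [r])).items.map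
                (fun p => (p.1, pvMergeA p.2))) := by
          apply PySem.Dict.ext
          rw [PySem.Dict.items_insert_of_not_contains _ _ hmmc,
            PySem.Dict.items_insert_of_not_contains _ _ hgc]
          show gsI.items.map _ ++ [(key, PySem.Dict.mk r)] = (gsI.items ++ _).map _
          rw [List.map_append, hgd]
          rfl
        rw [hins]
        apply ih
        · intro p hp
          rw [PySem.Dict.mem_items_insert] at hp
          rcases hp with h1 | h2
          · rw [h1]; simp
          · exact hgs p h2.1
        · exact PySem.Dict.nodup_keys_insert _ _ _ hnd
      | some g =>
        have hmk : (PySem.Dict.mk (gsI.items.map (fun p => (p.1, pvMergeA p.2)))).get? key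
            = some (pvMergeA g) := by rw [hmm, hg]; rfl
        have hgc : gsI.contains key = true := by
          rw [PySem.Dict.contains_eq_isSome_get?, hg]; rfl
        have hmmc : (PySem.Dict.mk (gsI.items.map (fun p => (p.1, pvMergeA p.2)))).contains key
            = true := by rw [PySem.Dict.contains_eq_isSome_get?, hmk]; rfl
        have hgd : gsI.getD key [] = g := PySem.Dict.getD_of_get?_eq_some gsI [] hg
        have hgne : g ≠ [] := hgs (key, g) (PySem.Dict.mem_items_of_get?_eq_some gsI hg)
        have hmg : pvMergeA (g ++ [r]) = pvFillA (pvMergeA g) r := by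
          cases g with
          | nil => exact absurd rfl hgne
          | cons r0 t0 =>
            show (t0 ++ [r]).foldl pvFillA (PySem.Dict.mk r0) = _
            rw [List.foldl_append]
            rfl
        rw [show pvStepA unique_key
            (PySem.Dict.mk (gsI.items.map (fun p => (p.1, pvMergeA p.2)))) r
            = (PySem.Dict.mk (gsI.items.map (fun p => (p.1, pvMergeA p.2)))).insert key
                (pvFillA (pvMergeA g) r) from by simp only [pvStepA, hk, hmk]]
        have hins : (PySem.Dict.mk (gsI.items.map (fun p => (p.1, pvMergeA p.2)))).insert key
            (pvFillA (pvMergeA g) r)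
            = PySem.Dict.mk ((gsI.insert key (gsI.getD key [] ++ [r])).items.map
                (fun p => (p.1, pvMergeA p.2))) := by
          apply PySem.Dict.ext
          rw [PySem.Dict.items_insert_of_contains _ _ hmmc,
            PySem.Dict.items_insert_of_contains _ _ hgc]
          show (gsI.items.map _).map _ = (gsI.items.map _).map _
          rw [List.map_map, List.map_map]
          apply List.map_congr_left
          intro p hp
          by_cases hpk : p.1 = key
          · simp [Function.comp, hpk, hgd, hmg]
          · simp [Function.comp, hpk]
        rw [hins]
        apply ih
        · intro p hp
          rw [PySem.Dict.mem_items_insert] at hp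
          rcases hp with h1 | h2
          · rw [h1]; simp
          · exact hgs p h2.1
        · exact PySem.Dict.nodup_keys_insert _ _ _ hnd

-- ===== VERDICT (by name: the statement is the Claim_ definition above) =====
theorem merge_partial_records_spec : Claim_equal_merge_partial_records := by
  unfold Claim_equal_merge_partial_records
  intro records unique_key hdom hpre
  unfold Spec_merge_partial_records
  unfold Pre_merge_partial_records at hpre
  unfold merge_partial_records merge_partial_records_alt
  have h0 : ∀ p ∈ (PySem.Dict.empty :
      PySem.Dict String (List (List (String × Option String)))).items, p.2 ≠ [] := by
    intro p hp
    rw [show (PySem.Dict.empty :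
      PySem.Dict String (List (List (String × Option String)))).items = [] from rfl] at hp
    cases hp
  have hnd0 : (PySem.Dict.empty :
      PySem.Dict String (List (List (String × Option String)))).keys.Nodup := by
    rw [show (PySem.Dict.empty :
      PySem.Dict String (List (List (String × Option String)))).keys = [] from rfl]
    exact List.nodup_nil
  have houter := pvOuter unique_key records PySem.Dict.empty h0 hnd0
  rw [show PySem.Dict.mk (((PySem.Dict.empty :
      PySem.Dict String (List (List (String × Option String)))).items).map
        (fun p => (p.1, pvMergeA p.2)))
      = (PySem.Dict.empty : PySem.Dict String (PySem.Dict String (Option String))) from rfl]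
    at houter
  rw [houter]
  have hwf := pvGroups_wf unique_key records PySem.Dict.empty hpre
    (fun p hp => absurd hp (by
      rw [show (PySem.Dict.empty :
        PySem.Dict String (List (List (String × Option String)))).items = [] from rfl]
      exact List.not_mem_nil))
  show ((PySem.Dict.mk ((records.foldl (pvStepGroup unique_key)
      PySem.Dict.empty).items.map (fun p => (p.1, pvMergeA p.2)))).items.map Prod.snd).map
        PySem.Dict.items
    = ((records.foldl (pvStepGroup unique_key) PySem.Dict.empty).items.map Prod.snd).map
        pvMergeGroup
  rw [show (PySem.Dict.mk ((records.foldl (pvStepGroup unique_key)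
      PySem.Dict.empty).items.map (fun p => (p.1, pvMergeA p.2)))).items
    = (records.foldl (pvStepGroup unique_key) PySem.Dict.empty).items.map
        (fun p => (p.1, pvMergeA p.2)) from rfl]
  rw [List.map_map, List.map_map, List.map_map]
  apply List.map_congr_left
  intro p hp
  obtain ⟨hne, hnds⟩ := hwf p hp
  cases hcons : p.2 with
  | nil => exact absurd hcons hne
  | cons r0 t0 =>
    have hnd0' : (r0.map Prod.fst).Nodup := hnds r0 (hcons ▸ List.mem_cons_self)
    show PySem.Dict.items (pvMergeA p.2) = pvMergeGroup p.2
    rw [hcons, pvMergeA_build r0 t0 hnd0', pvMergeGroup_eq r0 t0 hnd0']
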